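-- pv_equiv track=rewrite | github.com/mtasa-typescript/mtasa-wiki-parser | src/fetch/fetch_function.py | parse_get_function_description
-- ===== SOURCE A (Python) =====
-- def parse_get_function_description(data: str) -> str:
--     description = ''
--     for line in data.split('\n'):
--         if line == '':
--             continue
--
--         if line.startswith(('{', '_')):
--             continue
--
--         if line.startswith('='):
--             break  # Stop at first header
--
--         description += f'{line}\n'
--
--     return description
-- ===== SOURCE B (Python) =====
-- def parse_get_function_description(data: str) -> str:
--     # Character-level streaming state machine: no line list is ever built.
--     out = []
--     buf = []
--     for ch in data + '\n':  # sentinel newline terminates the final line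
--         if ch != '\n':
--             buf.append(ch)
--             continue
--         if buf:
--             c0 = buf[0]
--             if c0 == '=':
--                 return ''.join(out)
--             if c0 != '{' and c0 != '_':
--                 out.extend(buf)
--                 out.append('\n')
--         buf = []
--     return ''.join(out)
-- ===== Notes on version B (the rewrite author's own statement) =====
-- stated objective: alternative
-- what changed: Replaces A's split-into-lines-then-filter loop by a character-level streaming state machine that never builds a line list: it scans the characters once with a current-line buffer, flushing or dropping the buffer at each newline and stopping when a buffered line starts with the header marker.
import Mathlib
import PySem

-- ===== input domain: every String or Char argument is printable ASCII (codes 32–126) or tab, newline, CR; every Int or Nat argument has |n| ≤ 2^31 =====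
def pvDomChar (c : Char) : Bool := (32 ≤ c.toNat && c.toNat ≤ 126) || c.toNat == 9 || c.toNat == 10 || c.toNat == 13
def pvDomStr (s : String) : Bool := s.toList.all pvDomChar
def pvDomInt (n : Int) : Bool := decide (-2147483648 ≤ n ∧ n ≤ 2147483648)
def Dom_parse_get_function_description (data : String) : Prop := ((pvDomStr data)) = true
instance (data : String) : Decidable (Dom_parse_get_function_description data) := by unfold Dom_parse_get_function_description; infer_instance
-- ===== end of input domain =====

-- B replaces A's split-into-lines loop by a character-level streaming state machine
-- (no line list is ever built); alternative decomposition, same cost.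


-- ===== PORT A =====
-- A's for-loop over data.split('\n') with continue/break, carrying accumulator `description`
-- (lines kept as char lists; String.ofList at the end is the only string packaging)
def pvALoop (acc : List Char) : List (List Char) → List Char
  | [] => acc
  | line :: rest =>
    if line = [] then pvALoop acc rest
    else if PySem.Chars.startswith line ['{'] || PySem.Chars.startswith line ['_'] then
      pvALoop acc rest
    else if PySem.Chars.startswith line ['='] then acc
    else pvALoop (acc ++ line ++ ['\n']) rest

def parse_get_function_description (data : String) : String :=
  String.ofList (pvALoop [] ((PySem.Chars.split? data.toList ['\n']).getD []))

-- ===== PORT B =====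
-- B's character-level state machine over data + '\n': `out` is the emitted output,
-- `buf` the current line; at each '\n' the buffer is flushed, dropped, or ends the scan.
def pvBLoop (out buf : List Char) : List Char → List Char
  | [] => out
  | c :: rest =>
    if c ≠ '\n' then pvBLoop out (buf ++ [c]) rest
    else
      match buf with
      | [] => pvBLoop out [] rest
      | c0 :: _ =>
        if c0 = '=' then out
        else if c0 ≠ '{' ∧ c0 ≠ '_' then pvBLoop (out ++ buf ++ ['\n']) [] rest
        else pvBLoop out [] rest

def parse_get_function_description_alt (data : String) : String :=
  String.ofList (pvBLoop [] [] (data.toList ++ ['\n']))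

-- ===== PRECONDITION & SPEC =====
def Spec_parse_get_function_description (data : String) (out : String) : Prop := out = parse_get_function_description_alt data
instance (data : String) (out : String) : Decidable (Spec_parse_get_function_description data out) := by unfold Spec_parse_get_function_description; infer_instance

-- ===== CLAIM (what is proved, stated in full; the proofs are below) =====
def Claim_equal_parse_get_function_description : Prop := ∀ (data : String), Dom_parse_get_function_description data → Spec_parse_get_function_description data (parse_get_function_description data)

-- ===== LEMMAS AND PROOFS =====

-- reference line splitter (proof helper): split on '\n', always nonempty
def pvLines : List Char → List (List Char)
  | [] => [[]]
  | c :: rest =>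
    if c = '\n' then [] :: pvLines rest
    else
      match pvLines rest with
      | l :: ls => (c :: l) :: ls
      | [] => [[c]]

theorem pvLines_ne_nil (cs : List Char) : pvLines cs ≠ [] := by
  cases cs with
  | nil => simp [pvLines]
  | cons c rest =>
    simp only [pvLines]
    split
    · simp
    · split <;> simp

-- prepend a partial line to the first line of a split
def pvFirstCat (buf : List Char) (ls : List (List Char)) : List (List Char) :=
  match ls with
  | x :: xs => (buf ++ x) :: xs
  | [] => [buf]

theorem pvSplitOn_go_spec (fuel : Nat) :
    ∀ (l cur : List Char) (accs : List (List Char)), l.length < fuel →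
      PySem.Chars.splitOn.go ['\n'] fuel l cur accs =
        accs.reverse ++ pvFirstCat cur.reverse (pvLines l) := by
  induction fuel with
  | zero => intro l cur accs h; omega
  | succ f ih =>
    intro l cur accs h
    cases l with
    | nil =>
      simp [PySem.Chars.splitOn.go, pvLines, pvFirstCat]
    | cons c rest =>
      simp only [PySem.Chars.splitOn.go]
      by_cases hc : c = '\n'
      · subst hc
        rw [if_pos (by simp [List.isPrefixOf])]
        simp only [List.length, List.drop_succ_cons, List.drop_zero]
        rw [ih rest [] (cur.reverse :: accs) (by simpa using Nat.lt_of_succ_lt_succ h)]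
        simp only [pvLines, pvFirstCat]
        cases hls : pvLines rest with
        | nil => exact absurd hls (pvLines_ne_nil rest)
        | cons x xs => simp
      · rw [if_neg (by simp [List.isPrefixOf]; intro he; exact hc he.symm)]
        rw [ih rest (c :: cur) accs (by simpa using Nat.lt_of_succ_lt_succ h)]
        simp only [pvLines, if_neg hc]
        cases hls : pvLines rest with
        | nil => exact absurd hls (pvLines_ne_nil rest)
        | cons x xs => simp [pvFirstCat]

theorem pvSplitOn_eq (cs : List Char) :
    PySem.Chars.splitOn cs ['\n'] = pvLines cs := by
  have h := pvSplitOn_go_spec (cs.length + 1) cs [] [] (by omega)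
  cases hls : pvLines cs with
  | nil => exact absurd hls (pvLines_ne_nil cs)
  | cons x xs =>
    rw [hls] at h
    simpa [PySem.Chars.splitOn, pvFirstCat] using h

theorem pvStartsSingle (c0 : Char) (t : List Char) (c : Char) :
    PySem.Chars.startswith (c0 :: t) [c] = decide (c0 = c) := by
  simp [PySem.Chars.startswith, List.isPrefixOf, eq_comm, BEq.beq]

-- step lemmas for B's machine
theorem pvBLoop_nl_nil (out rest : List Char) :
    pvBLoop out [] ('\n' :: rest) = pvBLoop out [] rest := by simp [pvBLoop]

theorem pvBLoop_nl_cons (out : List Char) (c0 : Char) (t rest : List Char) :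
    pvBLoop out (c0 :: t) ('\n' :: rest)
      = if c0 = '=' then out
        else if c0 ≠ '{' ∧ c0 ≠ '_' then pvBLoop (out ++ (c0 :: t) ++ ['\n']) [] rest
        else pvBLoop out [] rest := by simp [pvBLoop]

theorem pvBLoop_other (out buf : List Char) (c : Char) (rest : List Char) (h : c ≠ '\n') :
    pvBLoop out buf (c :: rest) = pvBLoop out (buf ++ [c]) rest := by simp [pvBLoop, h]

theorem pvFirstCat_nil_lines (cs : List Char) :
    pvFirstCat [] (pvLines cs) = pvLines cs := by
  cases hls : pvLines cs with
  | nil => exact absurd hls (pvLines_ne_nil cs)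
  | cons x xs => simp [pvFirstCat]

-- A's loop on one nonempty line, as a plain if-cascade on its first character
theorem pvAStep (out : List Char) (c0 : Char) (t : List Char) (ls : List (List Char)) :
    pvALoop out ((c0 :: t) :: ls)
      = if c0 = '=' then out
        else if c0 ≠ '{' ∧ c0 ≠ '_' then pvALoop (out ++ (c0 :: t) ++ ['\n']) ls
        else pvALoop out ls := by
  rw [pvALoop, if_neg (by simp)]
  by_cases h0 : c0 = '='
  · rw [if_neg (by simp [pvStartsSingle, h0]), if_pos (by simp [pvStartsSingle, h0]), if_pos h0]
  · by_cases h1 : c0 = '{' ∨ c0 = '_'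
    · rw [if_pos (by rcases h1 with h | h <;> simp [pvStartsSingle, h]), if_neg h0,
        if_neg (by tauto)]
    · rw [if_neg (by simp [pvStartsSingle]; tauto), if_neg (by simp [pvStartsSingle, h0]),
        if_neg h0, if_pos (by tauto)]

-- main invariant: B's machine on cs (plus sentinel newline) with partial line `buf`
-- runs A's line loop on `buf` glued onto the lines of cs
theorem pvBLoop_eq (cs : List Char) :
    ∀ buf out, pvBLoop out buf (cs ++ ['\n']) = pvALoop out (pvFirstCat buf (pvLines cs)) := by
  induction cs with
  | nil =>
    intro buf out
    rw [List.nil_append]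
    cases buf with
    | nil => simp [pvBLoop, pvALoop, pvLines, pvFirstCat]
    | cons c0 t =>
      rw [pvBLoop_nl_cons]
      simp only [pvLines, pvFirstCat, List.append_nil, pvAStep]
      split
      · rfl
      · split <;> simp [pvBLoop, pvALoop]
  | cons c rest ih =>
    intro buf out
    by_cases hc : c = '\n'
    · subst hc
      rw [List.cons_append]
      have hlines : pvLines ('\n' :: rest) = [] :: pvLines rest := by
        simp [pvLines]
      cases buf with
      | nil =>
        rw [pvBLoop_nl_nil, ih [] out, pvFirstCat_nil_lines, hlines]
        have hfc : pvFirstCat [] ([] :: pvLines rest) = [] :: pvLines rest := by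
          simp [pvFirstCat]
        rw [hfc, pvALoop, if_pos rfl]
      | cons c0 t =>
        rw [pvBLoop_nl_cons, hlines]
        simp only [pvFirstCat, List.append_nil]
        rw [pvAStep]
        split
        · rfl
        · split <;> rw [ih, pvFirstCat_nil_lines]
    · rw [List.cons_append, pvBLoop_other _ _ _ _ hc, ih (buf ++ [c]) out]
      simp only [pvLines, if_neg hc]
      cases hls : pvLines rest with
      | nil => exact absurd hls (pvLines_ne_nil rest)
      | cons x xs => simp [pvFirstCat]

-- ===== VERDICT (by name: the statement is the Claim_ definition above) =====
theorem parse_get_function_description_spec : Claim_equal_parse_get_function_description := by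
  intro data _
  unfold Spec_parse_get_function_description parse_get_function_description parse_get_function_description_alt
  rw [pvBLoop_eq]
  simp [PySem.Chars.split?, pvSplitOn_eq, pvFirstCat_nil_lines]
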